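-- pv_equiv track=rewrite | github.com/paularcoleo/dailyprog | splurth_01b.py | check_Symbol
-- ===== SOURCE A (Python) =====
-- def check_Symbol(element, symbol):
--     element_chars = list(element.lower())
--     first, second = list(symbol.lower())
--     first_indices = [i for i, x in enumerate(element_chars) if x == first]
--     if len(first_indices) > 0:
--         for i in range(0, len(first_indices)):
--             second_indices = [
--                 i for i, x in enumerate(element_chars[first_indices[i] + 1:])
--                 if x == second]
--
--             valid = True if len(second_indices) > 0 else False
--             if valid:
--                 return valid
--     return False
-- ===== SOURCE B (Python) =====
-- def check_Symbol(element, symbol):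
--     first, second = symbol.lower()
--     element = element.lower()
--     idx = element.find(first)
--     if idx == -1:
--         return False
--     return second in element[idx + 1:]
-- ===== Notes on version B (the rewrite author's own statement) =====
-- stated objective: simpler
-- what changed: Replaces A's nested scans (collect all first-letter indices, then rescan the tail after each one) with a single find of the earliest first-letter occurrence plus one membership test on the remaining tail, which suffices because the earliest occurrence leaves the longest tail.
import Mathlib
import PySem

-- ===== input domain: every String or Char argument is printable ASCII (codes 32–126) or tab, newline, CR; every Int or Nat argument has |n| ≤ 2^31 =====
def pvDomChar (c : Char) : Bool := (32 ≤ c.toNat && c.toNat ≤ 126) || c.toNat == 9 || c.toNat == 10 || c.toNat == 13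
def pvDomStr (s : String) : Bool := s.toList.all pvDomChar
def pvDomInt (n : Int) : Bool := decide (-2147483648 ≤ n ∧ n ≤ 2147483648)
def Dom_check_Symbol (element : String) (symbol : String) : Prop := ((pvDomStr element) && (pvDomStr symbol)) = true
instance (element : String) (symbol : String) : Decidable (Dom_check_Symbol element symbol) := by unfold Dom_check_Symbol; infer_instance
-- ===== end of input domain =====

-- B is simpler: one find of the earliest first-letter occurrence plus one membership
-- test on the tail, instead of A's rescan of the tail after every first-letter index.
-- ===== PORT A =====

-- the list comprehension [i for i, x in enumerate(xs) if x == c]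
def occIdx (c : Char) (xs : List Char) : List Int :=
  (PySem.List.enumerate xs 0).filterMap (fun p => if p.2 == c then some p.1 else none)

-- the 'for i in range(0, len(first_indices))' loop body of A
def checkLoop (ec : List Char) (second : Char) : List Int → Bool
  | [] => false
  | fi :: rest =>
      let second_indices := occIdx second (PySem.List.slice ec (some (fi + 1)) none)
      let valid := if second_indices.length > 0 then true else false
      if valid then valid else checkLoop ec second rest

def check_Symbol (element : String) (symbol : String) : Bool :=
  let element_chars := (PySem.Str.lower element).toList
  match (PySem.Str.lower symbol).toList with
  | [first, second] =>
      let first_indices := occIdx first element_chars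
      if first_indices.length > 0 then checkLoop element_chars second first_indices
      else false
  | _ => false  -- symbol.lower() does not have exactly two chars: Python A raises ValueError (outside Pre_)

-- ===== PORT B =====
def check_Symbol_alt (element : String) (symbol : String) : Bool :=
  let sl := (PySem.Str.lower symbol).toList
  if hsl : sl.length = 2 then        -- the two-way unpack 'first, second = …' (else ValueError, outside Pre_)
    let first := sl[0]'(by omega)
    let second := sl[1]'(by omega)
    let el := (PySem.Str.lower element).toList
    let idx := PySem.Chars.find el [first]
    if idx == -1 then false
    else PySem.Chars.isIn [second] (PySem.Chars.slice el (some (idx + 1)) none)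
  else false

-- ===== PRECONDITION & SPEC =====
-- Pre_ excludes symbols whose lowercased form does not have exactly two characters:
-- there the unpack 'first, second = …' raises ValueError in A (and in B alike).
def Pre_check_Symbol (element : String) (symbol : String) : Prop :=
  (PySem.Chars.lower symbol.toList).length = 2
instance (element : String) (symbol : String) : Decidable (Pre_check_Symbol element symbol) := by
  unfold Pre_check_Symbol; infer_instance
def pvWitness_check_Symbol : String × String := ("Hydrogen", "dG")

def Spec_check_Symbol (element : String) (symbol : String) (out : Bool) : Prop := out = check_Symbol_alt element symbol
instance (element : String) (symbol : String) (out : Bool) : Decidable (Spec_check_Symbol element symbol out) := by unfold Spec_check_Symbol; infer_instance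

-- ===== CLAIM (what is proved, stated in full; the proofs are below) =====
def Claim_equal_check_Symbol : Prop := ∀ (element : String) (symbol : String), Dom_check_Symbol element symbol → Pre_check_Symbol element symbol → Spec_check_Symbol element symbol (check_Symbol element symbol)

-- ===== LEMMAS AND PROOFS =====

theorem mem_occIdx {c : Char} {xs : List Char} {fi : Int} :
    fi ∈ occIdx c xs ↔ ∃ (k : Nat) (h : k < xs.length), fi = (k : Int) ∧ xs[k] = c := by
  simp only [occIdx, List.mem_filterMap]
  constructor
  · rintro ⟨p, hp, hsome⟩
    rw [PySem.List.mem_enumerate_iff] at hp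
    obtain ⟨k, hk, rfl⟩ := hp
    by_cases h : xs[k] = c
    · exact ⟨k, hk, by simpa [h] using hsome.symm, h⟩
    · simp [h] at hsome
  · rintro ⟨k, hk, rfl, hc⟩
    exact ⟨((k : Int), xs[k]), by
      rw [PySem.List.mem_enumerate_iff]; exact ⟨k, hk, by simp⟩, by simp [hc]⟩

theorem occIdx_len_pos {c : Char} {xs : List Char} :
    0 < (occIdx c xs).length ↔ c ∈ xs := by
  rw [List.length_pos_iff]
  constructor
  · intro hne
    obtain ⟨fi, hfi⟩ := List.exists_mem_of_ne_nil _ hne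
    obtain ⟨k, hk, _, hc⟩ := mem_occIdx.mp hfi
    exact hc ▸ List.getElem_mem hk
  · intro hc
    obtain ⟨k, hk, rfl⟩ := List.getElem_of_mem hc
    exact List.ne_nil_of_mem (mem_occIdx.mpr ⟨k, hk, rfl, rfl⟩)

theorem singleton_prefix_iff {c : Char} {l : List Char} :
    [c] <+: l ↔ l[0]? = some c := by
  cases l with
  | nil => simp
  | cons a t => simp [List.cons_prefix_cons]; exact eq_comm

theorem checkLoop_true_iff {ec : List Char} {s : Char} {fis : List Int} :
    checkLoop ec s fis = true ↔
      ∃ fi ∈ fis, 0 < (occIdx s (PySem.List.slice ec (some (fi + 1)) none)).length := by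
  induction fis with
  | nil => simp [checkLoop]
  | cons fi rest ih =>
    simp only [checkLoop]
    by_cases h : 0 < (occIdx s (PySem.List.slice ec (some (fi + 1)) none)).length
    · simp [h]
    · simp [h, ih]

-- A returns true iff some first-letter index has the second letter strictly after it
theorem portA_true_iff {ec : List Char} {a b : Char} :
    (if 0 < (occIdx a ec).length then checkLoop ec b (occIdx a ec) else false) = true ↔
      ∃ k : Nat, ∃ _ : k < ec.length, ec[k] = a ∧ b ∈ ec.drop (k + 1) := by
  have hsl : ∀ k : Nat, PySem.List.slice ec (some ((k : Int) + 1)) none = ec.drop (k + 1) := by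
    intro k
    have : ((k : Int) + 1) = ((k + 1 : Nat) : Int) := by push_cast; ring
    rw [this, PySem.List.slice_from_natCast]
  constructor
  · intro h
    split_ifs at h with hpos
    · obtain ⟨fi, hfi, hmem⟩ := checkLoop_true_iff.mp h
      obtain ⟨k, hk, rfl, ha⟩ := mem_occIdx.mp hfi
      rw [hsl k, occIdx_len_pos] at hmem
      exact ⟨k, hk, ha, hmem⟩

  · rintro ⟨k, hk, ha, hb⟩
    have hfi : (k : Int) ∈ occIdx a ec := mem_occIdx.mpr ⟨k, hk, rfl, ha⟩
    have hpos : 0 < (occIdx a ec).length :=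
      List.length_pos_iff.mpr (List.ne_nil_of_mem hfi)
    rw [if_pos hpos, checkLoop_true_iff]
    exact ⟨(k : Int), hfi, by rw [hsl k, occIdx_len_pos]; exact hb⟩

theorem prefix_drop_iff {c : Char} {xs : List Char} {n : Nat} :
    [c] <+: xs.drop n ↔ xs[n]? = some c := by
  rw [singleton_prefix_iff, List.getElem?_drop, Nat.add_zero]

theorem singleton_infix_iff {c : Char} {l : List Char} :
    [c] <:+: l ↔ c ∈ l := by
  constructor
  · intro h; simpa using h.sublist
  · intro h
    obtain ⟨s, t, rfl⟩ := List.append_of_mem h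
    exact ⟨s, t, by simp⟩

-- B returns the same condition: second letter after the FIRST occurrence of the first
-- letter, which exists iff it occurs after SOME occurrence
theorem portB_true_iff {ec : List Char} {a b : Char} :
    (let idx := PySem.Chars.find ec [a];
     if idx == -1 then false
     else PySem.Chars.isIn [b] (PySem.Chars.slice ec (some (idx + 1)) none)) = true ↔
      ∃ k : Nat, ∃ _ : k < ec.length, ec[k] = a ∧ b ∈ ec.drop (k + 1) := by
  by_cases hneg : PySem.Chars.find ec [a] = -1
  · have hna : a ∉ ec := by
      intro hmem
      exact ((PySem.Chars.find_eq_neg_one_iff _ _).mp hneg) (singleton_infix_iff.mpr hmem)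
    simp only [hneg]
    constructor
    · intro h; simp at h
    · rintro ⟨k, hk, ha, -⟩
      exact absurd (ha ▸ List.getElem_mem hk) hna
  · have hnn : 0 ≤ PySem.Chars.find ec [a] := by
      have := PySem.Chars.neg_one_le_find (s := ec) (sub := [a]); omega
    set f := PySem.Chars.find ec [a] with hf
    obtain ⟨hpre, hmin⟩ := PySem.Chars.find_spec (s := ec) (sub := [a]) hnn
    have hget : ec[f.toNat]? = some a := prefix_drop_iff.mp hpre
    have hflt : f.toNat < ec.length := (List.getElem?_eq_some_iff.mp hget).1
    have hgete : ec[f.toNat] = a := by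
      have := List.getElem?_eq_getElem hflt; rw [this] at hget; exact Option.some.injEq .. ▸ by simpa using hget
    have hcast : f + 1 = ((f.toNat + 1 : Nat) : Int) := by push_cast; omega
    have hslice : PySem.Chars.slice ec (some (f + 1)) none = ec.drop (f.toNat + 1) := by
      rw [PySem.Chars.slice_eq_listSlice, hcast, PySem.List.slice_from_natCast]
    simp only [hneg, beq_iff_eq, if_false, hslice]
    rw [PySem.Chars.isIn_iff_infix, singleton_infix_iff]
    constructor
    · intro hb
      exact ⟨f.toNat, hflt, hgete, hb⟩
    · rintro ⟨k, hk, ha, hb⟩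
      have hkge : f.toNat ≤ k := by
        by_contra hlt
        exact hmin k (by omega) (prefix_drop_iff.mpr (by rw [List.getElem?_eq_getElem hk, ha]))
      have : ec.drop (k + 1) = (ec.drop (f.toNat + 1)).drop (k - f.toNat) := by
        rw [List.drop_drop]; congr 1; omega
      rw [this] at hb
      exact List.mem_of_mem_drop hb

theorem check_Symbol_spec : Claim_equal_check_Symbol := by
  intro element symbol _ hpre
  unfold Spec_check_Symbol check_Symbol check_Symbol_alt
  have hlen : (PySem.Str.lower symbol).toList.length = 2 := by
    simpa [PySem.Str.toList_lower] using hpre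
  obtain ⟨a, b, hab⟩ := List.length_eq_two.mp hlen
  simp only [hab, List.length_cons, List.length_nil, Nat.reduceAdd,
    List.getElem_cons_zero, List.getElem_cons_succ, dif_pos]
  rw [Bool.eq_iff_iff]
  exact portA_true_iff.trans portB_true_iff.symm
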